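-- pv_equiv track=rewrite | github.com/Funiusa/CodeTaining | switch_strings.py | switch_strings
-- ===== SOURCE A (Python) =====
-- def switch_strings(line: str, result: str) -> bool:
--     test, count = "", 0
--     line_size = len(line)
--     if len(result) == line_size and sorted(line) == sorted(result):
--         for i in range(line_size):
--             if result[i] == line[i]:
--                 test += line[i]
--             elif count < 2:
--                 test += result[i]
--                 count += 1
--     return test == result
-- ===== SOURCE B (Python) =====
-- def switch_strings(line: str, result: str) -> bool:
--     if len(line) != len(result):
--         return False
--     if sum(a != b for a, b in zip(line, result)) > 2:
--         return False
--     counts = {}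
--     for ch in line:
--         counts[ch] = counts.get(ch, 0) + 1
--     for ch in result:
--         counts[ch] = counts.get(ch, 0) - 1
--     return all(v == 0 for v in counts.values())
-- ===== Notes on version B (the rewrite author's own statement) =====
-- stated objective: faster
-- what changed: replaces the two sorts and the incremental test-string reconstruction with a single linear pass: a mismatch count over zip plus a +1/-1 character counter checked for all-zero
-- intended difference: when result is the empty string but line is not, A's length guard is skipped and it compares its empty test string with the empty result, returning True for a non-anagram; B returns False, the intended answer. — e.g. on switch_strings("a", ""): A returns true, B returns false
import Mathlib
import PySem

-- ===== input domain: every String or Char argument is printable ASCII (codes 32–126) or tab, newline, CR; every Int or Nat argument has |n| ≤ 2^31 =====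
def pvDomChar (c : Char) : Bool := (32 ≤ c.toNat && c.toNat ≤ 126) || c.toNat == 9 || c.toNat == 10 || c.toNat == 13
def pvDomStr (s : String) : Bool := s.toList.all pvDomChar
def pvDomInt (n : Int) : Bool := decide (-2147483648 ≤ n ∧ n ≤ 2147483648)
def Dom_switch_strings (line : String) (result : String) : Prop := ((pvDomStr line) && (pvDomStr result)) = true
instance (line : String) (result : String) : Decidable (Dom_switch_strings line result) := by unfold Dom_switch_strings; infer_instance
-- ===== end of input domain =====

-- B replaces A's two sorts and incremental test-string reconstruction by one linear pass (a mismatch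
-- count over the zipped strings plus a +1/-1 character counter checked for all-zero).
-- On result = "" with line ≠ "" A accidentally returns True (see D_ below); B returns False there.

-- ===== PORT A =====
def switch_strings (line : String) (result : String) : Bool :=
  let L := line.toList
  let R := result.toList
  let line_size := L.length
  let st : List Char × Int :=
    if R.length = line_size ∧
        PySem.List.sorted L (fun x => x) = PySem.List.sorted R (fun x => x) then
      (List.range line_size).foldl (fun st i =>
        if R.getD i ' ' = L.getD i ' ' then (st.1 ++ [L.getD i ' '], st.2)
        else if st.2 < 2 then (st.1 ++ [R.getD i ' '], st.2 + 1)
        else st) ([], 0)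
    else ([], 0)
  st.1 == R

-- ===== PORT B =====
def switch_strings_alt (line : String) (result : String) : Bool :=
  let L := line.toList
  let R := result.toList
  if L.length ≠ R.length then false
  else if 2 < ((L.zip R).map (fun p => if p.1 != p.2 then (1 : Int) else 0)).sum then false
  else
    let counts : PySem.Dict Char Int :=
      L.foldl (fun d ch => d.insert ch (d.getD ch 0 + 1)) PySem.Dict.empty
    let counts := R.foldl (fun d ch => d.insert ch (d.getD ch 0 - 1)) counts
    counts.values.all (fun v => v == 0)

-- ===== PRECONDITION & SPEC =====
-- When result is the empty string but line is not, A skips its length guard and compares its empty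
-- test string with the empty result, returning True for a non-anagram; B returns False, the
-- intended answer.
def D_switch_strings (line : String) (result : String) : Prop := result = "" ∧ line ≠ ""
instance (line : String) (result : String) : Decidable (D_switch_strings line result) := by
  unfold D_switch_strings; infer_instance
def Spec_switch_strings (line : String) (result : String) (out : Bool) : Prop :=
  ¬ D_switch_strings line result → out = switch_strings_alt line result
instance (line : String) (result : String) (out : Bool) : Decidable (Spec_switch_strings line result out) := by
  unfold Spec_switch_strings; infer_instance
def pvDiffWitness_switch_strings : String × String := ("a", "")
def pvDiffWitnessOut_switch_strings : Bool × Bool := (true, false)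

-- ===== CLAIM (what is proved, stated in full; the proofs are below) =====
def Claim_unchanged_switch_strings : Prop := ∀ (line : String) (result : String), Dom_switch_strings line result → Spec_switch_strings line result (switch_strings line result)
def Claim_changed_switch_strings : Prop := Dom_switch_strings (pvDiffWitness_switch_strings.1) (pvDiffWitness_switch_strings.2) ∧ D_switch_strings (pvDiffWitness_switch_strings.1) (pvDiffWitness_switch_strings.2) ∧ switch_strings (pvDiffWitness_switch_strings.1) (pvDiffWitness_switch_strings.2) = pvDiffWitnessOut_switch_strings.1 ∧ switch_strings_alt (pvDiffWitness_switch_strings.1) (pvDiffWitness_switch_strings.2) = pvDiffWitnessOut_switch_strings.2 ∧ pvDiffWitnessOut_switch_strings.1 ≠ pvDiffWitnessOut_switch_strings.2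
def Claim_exact_switch_strings : Prop := ∀ (line : String) (result : String), Dom_switch_strings line result → D_switch_strings line result → switch_strings line result ≠ switch_strings_alt line result

-- ===== LEMMAS AND PROOFS =====

-- A's loop body, viewed on one (line-char, result-char) pair
def pvGStep (st : List Char × Int) (p : Char × Char) : List Char × Int :=
  if p.2 = p.1 then (st.1 ++ [p.1], st.2)
  else if st.2 < 2 then (st.1 ++ [p.2], st.2 + 1)
  else st

-- number of mismatching positions
def pvMis (P : List (Char × Char)) : Nat := P.countP (fun p => !(p.2 == p.1))

-- the difference counter B builds
def pvDiffD (L R : List Char) : PySem.Dict Char Int :=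
  R.foldl (fun d ch => d.insert ch (d.getD ch 0 - 1))
    (L.foldl (fun d ch => d.insert ch (d.getD ch 0 + 1)) PySem.Dict.empty)

theorem pv_bridge (L R : List Char) (hlen : R.length = L.length) :
    ∀ (n k : Nat) (st : List Char × Int), k + n = L.length →
    (List.range' k n).foldl (fun st i =>
        if R.getD i ' ' = L.getD i ' ' then (st.1 ++ [L.getD i ' '], st.2)
        else if st.2 < 2 then (st.1 ++ [R.getD i ' '], st.2 + 1)
        else st) st
      = ((L.drop k).zip (R.drop k)).foldl pvGStep st := by
  intro n
  induction n with
  | zero =>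
    intro k st hk
    have : L.drop k = [] := List.drop_eq_nil_of_le (by omega)
    simp [this]
  | succ n ih =>
    intro k st hk
    have hkL : k < L.length := by omega
    have hkR : k < R.length := by omega
    rw [List.range'_succ]
    rw [List.drop_eq_getElem_cons hkL, List.drop_eq_getElem_cons hkR]
    simp only [List.foldl_cons, List.zip_cons_cons]
    rw [List.getD_eq_getElem L ' ' hkL, List.getD_eq_getElem R ' ' hkR]
    rw [ih (k + 1) _ (by omega)]
    rfl

theorem pv_gfold_complete : ∀ (P : List (Char × Char)) (t : List Char) (c : Int),
    c + (pvMis P : Int) ≤ 2 → 0 ≤ c →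
    P.foldl pvGStep (t, c) = (t ++ P.map Prod.snd, c + pvMis P) := by
  intro P
  induction P with
  | nil => intro t c _ _; simp [pvMis]
  | cons p rest ih =>
    intro t c hle hc
    by_cases h : p.2 = p.1
    · have hm : pvMis (p :: rest) = pvMis rest := by simp [pvMis, h]
      rw [hm] at hle ⊢
      simp only [List.foldl_cons, pvGStep, if_pos h]
      rw [ih _ c hle hc]
      simp [h]
    · have hm : pvMis (p :: rest) = pvMis rest + 1 := by
        simp [pvMis, h]
      rw [hm] at hle ⊢
      have hc2 : c < 2 := by omega
      simp only [List.foldl_cons, pvGStep, if_neg h, if_pos hc2]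
      rw [ih _ (c + 1) (by push_cast at hle; omega) (by omega)]
      simp only [List.map_cons, Prod.mk.injEq]
      refine ⟨by simp, by push_cast; ring⟩

theorem pv_gfold_len_le : ∀ (P : List (Char × Char)) (t : List Char) (c : Int),
    (P.foldl pvGStep (t, c)).1.length ≤ t.length + P.length := by
  intro P
  induction P with
  | nil => intro t c; simp
  | cons p rest ih =>
    intro t c
    simp only [List.foldl_cons, pvGStep]
    split_ifs with h1 h2
    · have := ih (t ++ [p.1]) c; simp at this ⊢; omega
    · have := ih (t ++ [p.2]) (c + 1); simp at this ⊢; omega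
    · have := ih t c
      -- state after skip is (t, c)
      simp at this ⊢
      omega

theorem pv_gfold_len_lt : ∀ (P : List (Char × Char)) (t : List Char) (c : Int),
    c ≤ 2 → 2 < c + (pvMis P : Int) →
    (P.foldl pvGStep (t, c)).1.length < t.length + P.length := by
  intro P
  induction P with
  | nil => intro t c h1 h2; simp [pvMis] at h2; omega
  | cons p rest ih =>
    intro t c h1 h2
    by_cases h : p.2 = p.1
    · have hm : pvMis (p :: rest) = pvMis rest := by simp [pvMis, h]
      rw [hm] at h2
      simp only [List.foldl_cons, pvGStep, if_pos h]
      have := ih (t ++ [p.1]) c h1 h2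
      simp at this ⊢; omega
    · have hm : pvMis (p :: rest) = pvMis rest + 1 := by
        simp [pvMis, h]
      rw [hm] at h2
      by_cases hc2 : c < 2
      · simp only [List.foldl_cons, pvGStep, if_neg h, if_pos hc2]
        have := ih (t ++ [p.2]) (c + 1) (by omega) (by push_cast at h2 ⊢; omega)
        simp at this ⊢; omega
      · simp only [List.foldl_cons, pvGStep, if_neg h, if_neg hc2]
        have := pv_gfold_len_le rest t c
        simp at this ⊢; omega

theorem pv_getD_foldl_insert_sub_one (l : List Char) :
    ∀ (d : PySem.Dict Char Int) (v : Char),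
    (l.foldl (fun d x => d.insert x (d.getD x 0 - 1)) d).getD v 0 = d.getD v 0 - l.count v := by
  induction l with
  | nil => intro d v; simp
  | cons a rest ih =>
    intro d v
    simp only [List.foldl_cons]
    rw [ih, PySem.Dict.getD_insert, List.count_cons]
    by_cases h1 : v = a
    · simp_all
      omega
    · simp_all [Ne.symm h1]

theorem pv_diffD_getD (L R : List Char) (c : Char) :
    (pvDiffD L R).getD c 0 = (L.count c : Int) - (R.count c : Int) := by
  unfold pvDiffD
  rw [pv_getD_foldl_insert_sub_one, PySem.Dict.getD_foldl_insert_add_one, PySem.Dict.getD_empty]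
  ring

theorem pv_diffD_nodup (L R : List Char) : (pvDiffD L R).keys.Nodup := by
  unfold pvDiffD
  exact PySem.Dict.nodup_keys_foldl_insert _ _ _
    (PySem.Dict.nodup_keys_foldl_insert _ _ _ PySem.Dict.nodup_keys_empty)

theorem pv_mem_keys_diffD (L R : List Char) (c : Char) :
    c ∈ (pvDiffD L R).keys ↔ c ∈ L ∨ c ∈ R := by
  unfold pvDiffD
  rw [PySem.Dict.keys_foldl_insert, PySem.Dict.keys_foldl_insert]
  rw [PySem.Set.mem_update, PySem.Set.mem_update]
  simp [PySem.Dict.keys_empty]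

theorem pv_allzero_iff_perm (L R : List Char) :
    ((pvDiffD L R).values.all (fun v => v == 0) = true) ↔ L.Perm R := by
  rw [List.perm_iff_count]
  constructor
  · intro h a
    by_cases hk : a ∈ (pvDiffD L R).keys
    · have hv : (pvDiffD L R).getD a 0 ∈ (pvDiffD L R).values := by
        rw [PySem.Dict.values_eq_map_keys _ (pv_diffD_nodup L R) 0]
        exact List.mem_map_of_mem hk
      have := List.all_eq_true.mp h _ hv
      rw [pv_diffD_getD] at this
      simp at this
      omega
    · rw [pv_mem_keys_diffD] at hk
      rw [not_or] at hk
      rw [List.count_eq_zero_of_not_mem hk.1, List.count_eq_zero_of_not_mem hk.2]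
  · intro h
    rw [PySem.Dict.values_eq_map_keys _ (pv_diffD_nodup L R) 0]
    rw [List.all_eq_true]
    intro v hv
    rw [List.mem_map] at hv
    obtain ⟨k, _, rfl⟩ := hv
    rw [pv_diffD_getD, h k]
    simp

theorem pv_mis_eq (L R : List Char) :
    ((L.zip R).map (fun p => if p.1 != p.2 then (1 : Int) else 0)).sum
      = (pvMis (L.zip R) : Int) := by
  rw [PySem.List.sum_map_ite_one_zero (fun p => p.1 != p.2) (L.zip R)]
  unfold pvMis
  norm_cast
  apply List.countP_congr
  intro p _
  simp [bne, Bool.beq_comm]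

theorem pv_main (line result : String) (hD : ¬ D_switch_strings line result) :
    switch_strings line result = switch_strings_alt line result := by
  unfold switch_strings switch_strings_alt
  simp only []
  set L := line.toList with hL
  set R := result.toList with hR
  have hDR : R = [] → L = [] := by
    intro h
    by_contra hLne
    apply hD
    refine ⟨String.toList_eq_nil_iff.mp (hR ▸ h), fun hl => hLne ?_⟩
    rw [hL, hl]
    rfl
  have hfold : (R.foldl (fun d ch => d.insert ch (d.getD ch 0 - 1))
      (L.foldl (fun d ch => d.insert ch (d.getD ch 0 + 1)) PySem.Dict.empty)) = pvDiffD L R := rfl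
  by_cases hlen : R.length = L.length
  · have hzlen : (L.zip R).length = R.length := by simp [List.length_zip, hlen]
    by_cases hperm : L.Perm R
    · rw [if_pos ⟨hlen, (PySem.List.sorted_id_eq_sorted_id_iff_perm L R).mpr hperm⟩]
      rw [List.range_eq_range', pv_bridge L R hlen L.length 0 ([], 0) (by omega)]
      simp only [List.drop_zero]
      rw [if_neg (by omega), pv_mis_eq]
      by_cases hm : (pvMis (L.zip R) : Int) ≤ 2
      · rw [if_neg (by omega)]
        rw [pv_gfold_complete (L.zip R) [] 0 (by omega) le_rfl]
        rw [hfold, (pv_allzero_iff_perm L R).mpr hperm]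
        rw [List.nil_append, List.map_snd_zip hlen.le]
        simp
      · rw [if_pos (by omega)]
        have hlt := pv_gfold_len_lt (L.zip R) [] 0 (by norm_num) (by omega)
        rw [beq_eq_false_iff_ne]
        intro heq
        rw [heq] at hlt
        simp [hzlen] at hlt
    · rw [if_neg (by rintro ⟨_, hs⟩; exact hperm ((PySem.List.sorted_id_eq_sorted_id_iff_perm L R).mp hs))]
      rw [if_neg (by omega)]
      have hRne : R ≠ [] := fun h => hperm (by rw [h, hDR h])
      have hA : (([] : List Char) == R) = false := beq_eq_false_iff_ne.mpr (Ne.symm hRne)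
      rw [hA]
      split_ifs
      · rfl
      · rw [hfold]
        have hnz : ¬ ((pvDiffD L R).values.all (fun v => v == 0) = true) :=
          fun h => hperm ((pv_allzero_iff_perm L R).mp h)
        simp only [Bool.not_eq_true] at hnz
        exact hnz.symm
  · have hRne : R ≠ [] := by
      intro h
      rw [h, hDR h] at hlen
      exact hlen rfl
    rw [if_neg (fun hc => hlen hc.1)]
    rw [if_pos (fun h => hlen h.symm)]
    simp [hRne]

-- ===== VERDICT (by name: the statement is the Claim_ definition above) =====
theorem switch_strings_spec : Claim_unchanged_switch_strings := by
  intro line result _ hD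
  exact pv_main line result hD

theorem switch_strings_changed : Claim_changed_switch_strings := by
  unfold Claim_changed_switch_strings; decide

theorem switch_strings_tight : Claim_exact_switch_strings := by
  intro line result _ hd
  obtain ⟨hr, hl⟩ := hd
  subst hr
  unfold switch_strings switch_strings_alt
  simp only []
  have hLne : line.toList ≠ [] := fun h => hl (String.toList_eq_nil_iff.mp h)
  rw [if_neg (fun hc => hLne (List.length_eq_zero_iff.mp hc.1.symm))]
  rw [if_pos (show line.toList.length ≠ "".toList.length from
    fun h => hLne (List.length_eq_zero_iff.mp (by simpa using h)))]
  simp
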